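-- pv_equiv track=rewrite | github.com/miekrr/CodeCleanup | verify.py | is_variable_in_paranthesis
-- ===== SOURCE A (Python) =====
-- def is_next_char_whitespace(line, idx):
--     if len(line) > idx :
--         if line[idx] in "_\t " :
--             return True
--     return False
--
-- def is_variable_in_paranthesis(line, end_var, varToBeRemoved) :
--     remove_statement = False
--     start_statement = None
--     if varToBeRemoved == "ERS4500_48GT_PWR":
--         pass
--     while is_next_char_whitespace(line, end_var):
--         end_var = end_var + 1
--     if len(line) <= end_var :
--         return False, None, None
--     current_idx = end_var
--     if line[current_idx] == ")" :
--         end_var = current_idx + 1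
--         remove_statement = True
--
--     if remove_statement == True :
--         balance = 1
--         current_idx = end_var - 1
--         while balance != 0 :
--             current_idx = current_idx - 1
--             if current_idx < 0 :
--                 balance = 0
--                 continue
--             if line[current_idx] == ")" :
--                 balance = balance + 1;
--             if line[current_idx] == "(" :
--                 balance = balance - 1;
--         start_statement = current_idx
--     else :
--         return remove_statement, None, None
--     before = line[start_statement-2: start_statement]
--
--     while line[end_var] == " " :
--         end_var = end_var + 1
--
--     after = line[end_var:end_var+2]
--
--     if after == "&&" or after == "||" :
--         end_var = end_var + 2
--     else :
--         if before == "&&" or before == "||" :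
--             start_statement = start_statement - 2
--
--     return remove_statement, start_statement, end_var
-- ===== SOURCE B (Python) =====
-- def is_variable_in_paranthesis(line, end_var, varToBeRemoved):
--     n = len(line)
--     i = end_var
--     while i < n and line[i] in "_\t ":
--         i += 1
--     if i >= n or line[i] != ")":
--         return False, None, None
--     # forward single pass: stack of unmatched '(' indices over line[:i];
--     # the top (or -1 for an empty stack) is the match of the ')' at i
--     stack = []
--     for k, c in enumerate(line[:i]):
--         if c == "(":
--             stack.append(k)
--         elif c == ")" and stack:
--             stack.pop()
--     start = stack[-1] if stack else -1
--     j = i + 1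
--     while j < n and line[j] == " ":
--         j += 1
--     if line[j:j + 2] in ("&&", "||"):
--         return True, start, j + 2
--     if line[start - 2:start] in ("&&", "||"):
--         start -= 2
--     return True, start, j
-- ===== Notes on version B (the rewrite author's own statement) =====
-- stated objective: simpler
-- what changed: The backward balance-counter search for the matching '(' is replaced by a forward single-pass stack scan over line[:i] (push '(' indices, pop on ')', top = match, -1 if empty), and the whitespace/space skips and operator checks are folded into short guarded loops with a single early return.
-- outside the precondition, e.g. on is_variable_in_paranthesis('()', -1, 'x'): A returns (True, -2, 0), B returns (True, 0, 0); on is_variable_in_paranthesis(')', 0, 'x'): A raises IndexError, B returns (True, -1, 1)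
import Mathlib
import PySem

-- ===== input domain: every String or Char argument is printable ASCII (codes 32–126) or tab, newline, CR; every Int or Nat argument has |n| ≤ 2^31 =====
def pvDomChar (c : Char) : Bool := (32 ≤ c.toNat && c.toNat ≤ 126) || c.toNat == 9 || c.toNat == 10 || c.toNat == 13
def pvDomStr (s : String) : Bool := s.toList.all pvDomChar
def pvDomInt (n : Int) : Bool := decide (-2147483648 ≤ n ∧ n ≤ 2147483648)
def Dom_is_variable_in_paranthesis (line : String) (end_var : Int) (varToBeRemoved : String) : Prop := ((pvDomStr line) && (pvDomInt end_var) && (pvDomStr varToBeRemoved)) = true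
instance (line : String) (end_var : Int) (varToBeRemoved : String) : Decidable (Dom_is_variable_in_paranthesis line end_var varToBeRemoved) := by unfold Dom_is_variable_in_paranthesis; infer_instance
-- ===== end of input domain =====

-- B replaces A's backward balance-counter search for the matching '(' by a forward single-pass
-- stack scan and folds the whitespace/operator bookkeeping into guarded loops: simpler, same O(n) cost.


-- ===== PORT A =====

-- helper is_next_char_whitespace(line, idx)
def pvIsNextCharWs (s : List Char) (idx : Int) : Bool :=
  if (s.length : Int) > idx then
    match PySem.List.pyGet? s idx with
    | some c => c == '_' || c == '\t' || c == ' '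
    | none => false   -- Python raises IndexError here (idx < -len); those inputs are outside Pre_
  else false

theorem pvIsNextCharWs_lt {s : List Char} {i : Int} (h : pvIsNextCharWs s i = true) :
    i < (s.length : Int) := by
  unfold pvIsNextCharWs at h
  by_cases hc : (s.length : Int) > i
  · omega
  · simp [hc] at h

-- A's `while is_next_char_whitespace(line, end_var): end_var += 1`
def pvSkipWsA (s : List Char) (i : Int) : Int :=
  if h : pvIsNextCharWs s i then pvSkipWsA s (i + 1) else i
termination_by ((s.length : Int) + 1 - i).toNat
decreasing_by have := pvIsNextCharWs_lt h; omega

theorem pvPyGetSome_lt {α : Type} {s : List α} {i : Int} {c : α}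
    (h : PySem.List.pyGet? s i = some c) : i < (s.length : Int) := by
  by_contra hge
  have hn : PySem.List.pyGet? s i = none := by
    rw [PySem.List.pyGet?_eq_none_iff]
    intro hr
    exact hge hr.2
  rw [hn] at h
  simp at h

-- A's backward balance loop `while balance != 0: current_idx -= 1; …`
def pvBalanceA (s : List Char) (balance : Int) (current_idx : Int) : Int :=
  if balance = 0 then current_idx
  else if h : current_idx - 1 < 0 then current_idx - 1
  else
    -- line[current_idx] : index is in [0, len) at every call reached from the port, so pyGetD is exact
    let c := PySem.List.pyGetD s (current_idx - 1) ' '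
    let b1 := if c = ')' then balance + 1 else balance
    let b2 := if c = '(' then b1 - 1 else b1
    pvBalanceA s b2 (current_idx - 1)
termination_by (current_idx + 1).toNat
decreasing_by omega

-- A's `while line[end_var] == " ": end_var += 1` (none = IndexError past the end; outside Pre_)
def pvSkipSpacesA (s : List Char) (i : Int) : Option Int :=
  match h : PySem.List.pyGet? s i with
  | none => none
  | some c => if c = ' ' then pvSkipSpacesA s (i + 1) else some i
termination_by ((s.length : Int) - i).toNat
decreasing_by have := pvPyGetSome_lt h; omega

def is_variable_in_paranthesis (line : String) (end_var : Int) (varToBeRemoved : String) : Bool × Option Int × Option Int :=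
  let s := line.toList
  -- `if varToBeRemoved == "ERS4500_48GT_PWR": pass` — no effect
  let ev := pvSkipWsA s end_var
  if (s.length : Int) ≤ ev then (false, none, none)
  else
    match PySem.List.pyGet? s ev with
    | none => (false, none, none)   -- Python raises IndexError here (ev < -len); outside Pre_
    | some c =>
      if c = ')' then
        -- end_var = current_idx + 1; remove_statement = True; balance search from end_var - 1
        let ev1 := ev + 1
        let start := pvBalanceA s 1 (ev1 - 1)
        let before := PySem.List.slice s (some (start - 2)) (some start)
        match pvSkipSpacesA s ev1 with
        | none => (false, none, none)   -- Python raises IndexError (only spaces to end of line); outside Pre_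
        | some ev2 =>
          let after := PySem.List.slice s (some ev2) (some (ev2 + 2))
          if after = ['&', '&'] ∨ after = ['|', '|'] then (true, some start, some (ev2 + 2))
          else if before = ['&', '&'] ∨ before = ['|', '|'] then (true, some (start - 2), some ev2)
          else (true, some start, some ev2)
      else (false, none, none)

-- ===== PORT B =====

-- B's `while i < n and line[i] in "_\t ": i += 1` (pyGetD is exact for -n ≤ i; Pre_ gives 0 ≤ i)
def pvSkipWsB (s : List Char) (i : Int) : Int :=
  if h : i < (s.length : Int) ∧ (PySem.List.pyGetD s i '?' == '_' || PySem.List.pyGetD s i '?' == '\t' || PySem.List.pyGetD s i '?' == ' ') = true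
  then pvSkipWsB s (i + 1) else i
termination_by ((s.length : Int) + 1 - i).toNat
decreasing_by omega

-- B's `while j < n and line[j] == " ": j += 1`
def pvSkipSpB (s : List Char) (j : Int) : Int :=
  if h : j < (s.length : Int) ∧ PySem.List.pyGetD s j '?' = ' ' then pvSkipSpB s (j + 1) else j
termination_by ((s.length : Int) + 1 - j).toNat
decreasing_by omega

-- B's loop body: push the index of each '(', pop on ')' when the stack is non-empty
def pvStackStep (st : List Int) (kc : Int × Char) : List Int :=
  if kc.2 = '(' then kc.1 :: st
  else if kc.2 = ')' ∧ st ≠ [] then st.tail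
  else st

def is_variable_in_paranthesis_alt (line : String) (end_var : Int) (varToBeRemoved : String) : Bool × Option Int × Option Int :=
  let s := line.toList
  let n : Int := (s.length : Int)
  let i := pvSkipWsB s end_var
  if n ≤ i ∨ PySem.List.pyGetD s i '?' ≠ ')' then (false, none, none)
  else
    -- forward single pass over line[:i]; the stack top is the match of the ')' at i
    let stack := (PySem.List.enumerate (PySem.List.slice s none (some i)) 0).foldl pvStackStep []
    let start := stack.headD (-1)
    let j := pvSkipSpB s (i + 1)
    let after := PySem.List.slice s (some j) (some (j + 2))
    if after = ['&', '&'] ∨ after = ['|', '|'] then (true, some start, some (j + 2))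
    else
      let before := PySem.List.slice s (some (start - 2)) (some start)
      if before = ['&', '&'] ∨ before = ['|', '|'] then (true, some (start - 2), some j)
      else (true, some start, some j)

-- ===== PRECONDITION & SPEC =====

-- Pre_ restricts end_var to the function's natural domain 0 ≤ end_var (for negative end_var A raises
-- IndexError or returns a value that depends on Python's negative-index wraparound, outside the
-- function's intended use of end_var as a position in line), and excludes the inputs on which the ')'
-- that A finds is followed only by spaces up to the end of the line, where A raises IndexError.
def Pre_is_variable_in_paranthesis (line : String) (end_var : Int) (varToBeRemoved : String) : Prop :=
  0 ≤ end_var ∧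
  ¬ (∃ j < line.toList.length, end_var ≤ (j : Int) ∧ line.toList[j]? = some ')' ∧
      (∀ k < j, end_var ≤ (k : Int) →
        line.toList[k]? = some '_' ∨ line.toList[k]? = some '\t' ∨ line.toList[k]? = some ' ') ∧
      (∀ k < line.toList.length, j < k → line.toList[k]? = some ' '))
instance (line : String) (end_var : Int) (varToBeRemoved : String) : Decidable (Pre_is_variable_in_paranthesis line end_var varToBeRemoved) := by unfold Pre_is_variable_in_paranthesis; infer_instance

def pvWitness_is_variable_in_paranthesis : String × Int × String := ("(a)&&b", 2, "x")

def Spec_is_variable_in_paranthesis (line : String) (end_var : Int) (varToBeRemoved : String) (out : Bool × Option Int × Option Int) : Prop := out = is_variable_in_paranthesis_alt line end_var varToBeRemoved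
instance (line : String) (end_var : Int) (varToBeRemoved : String) (out : Bool × Option Int × Option Int) : Decidable (Spec_is_variable_in_paranthesis line end_var varToBeRemoved out) := by unfold Spec_is_variable_in_paranthesis; infer_instance

-- ===== CLAIM (what is proved, stated in full; the proofs are below) =====
def Claim_equal_is_variable_in_paranthesis : Prop := ∀ (line : String) (end_var : Int) (varToBeRemoved : String), Dom_is_variable_in_paranthesis line end_var varToBeRemoved → Pre_is_variable_in_paranthesis line end_var varToBeRemoved → Spec_is_variable_in_paranthesis line end_var varToBeRemoved (is_variable_in_paranthesis line end_var varToBeRemoved)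

-- ===== LEMMAS AND PROOFS =====

theorem pvWitness_ok :
    Dom_is_variable_in_paranthesis (pvWitness_is_variable_in_paranthesis.1) (pvWitness_is_variable_in_paranthesis.2.1) (pvWitness_is_variable_in_paranthesis.2.2) ∧
    Pre_is_variable_in_paranthesis (pvWitness_is_variable_in_paranthesis.1) (pvWitness_is_variable_in_paranthesis.2.1) (pvWitness_is_variable_in_paranthesis.2.2) := by
  decide

-- The two whitespace-skipping loop conditions agree on nonnegative indices.
theorem pvCond_eq (s : List Char) (i : Int) (h0 : 0 ≤ i) :
    pvIsNextCharWs s i = true ↔ (i < (s.length : Int) ∧ (PySem.List.pyGetD s i '?' == '_' || PySem.List.pyGetD s i '?' == '	' || PySem.List.pyGetD s i '?' == ' ') = true) := by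
  unfold pvIsNextCharWs
  by_cases hc : i < (s.length : Int)
  · rw [PySem.List.pyGet?_eq_some_getElem s h0 hc,
        PySem.List.pyGetD_eq_getElem s '?' h0 hc]
    simp [hc]
  · simp [hc]

-- The two whitespace-skipping loops agree on nonnegative start indices.
theorem pvSkipWs_eq (s : List Char) (i : Int) (h0 : 0 ≤ i) : pvSkipWsA s i = pvSkipWsB s i := by
  rw [pvSkipWsA, pvSkipWsB]
  by_cases h : pvIsNextCharWs s i = true
  · rw [dif_pos h, dif_pos ((pvCond_eq s i h0).mp h)]
    exact pvSkipWs_eq s (i+1) (by omega)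
  · rw [dif_neg h, dif_neg (fun hc => h ((pvCond_eq s i h0).mpr hc))]
termination_by ((s.length : Int) + 1 - i).toNat
decreasing_by have := pvIsNextCharWs_lt h; omega

-- Characterisation of A's whitespace skip from a nonnegative index: the result is ≥ the start and
-- every skipped character is one of '_', '\t', ' '.
theorem pvSkipWsA_spec (s : List Char) (i : Int) (h0 : 0 ≤ i) :
    i ≤ pvSkipWsA s i ∧
    ∀ k : Nat, i ≤ (k : Int) → (k : Int) < pvSkipWsA s i →
      s[k]? = some '_' ∨ s[k]? = some '	' ∨ s[k]? = some ' ' := by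
  rw [pvSkipWsA]
  by_cases h : pvIsNextCharWs s i = true
  · rw [dif_pos h]
    have hlt := pvIsNextCharWs_lt h
    obtain ⟨ih1, ih2⟩ := pvSkipWsA_spec s (i+1) (by omega)
    refine ⟨by omega, fun k hk1 hk2 => ?_⟩
    by_cases hki : (k : Int) = i
    · -- character at i is whitespace
      have : PySem.List.pyGet? s i = some s[i.toNat] := PySem.List.pyGet?_eq_some_getElem s h0 hlt
      unfold pvIsNextCharWs at h
      rw [if_pos (by omega), this] at h
      have hk : k = i.toNat := by omega
      subst hk
      have hlen : i.toNat < s.length := by omega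
      rw [List.getElem?_eq_getElem hlen]
      rcases (by simpa using h : (s[i.toNat] = '_' ∨ s[i.toNat] = '	') ∨ s[i.toNat] = ' ') with (h'|h')|h' <;> simp [h']
    · exact ih2 k (by omega) hk2
  · rw [dif_neg h]
    exact ⟨le_refl i, fun k hk1 hk2 => by omega⟩
termination_by ((s.length : Int) + 1 - i).toNat
decreasing_by have := pvIsNextCharWs_lt h; omega

-- If some later character is not a space, A's space skip terminates without IndexError and agrees with B's.
theorem pvSkipSp_eq (s : List Char) (i : Int) (h0 : 0 ≤ i)
    (hw : ∃ k : Nat, i ≤ (k : Int) ∧ k < s.length ∧ s[k]? ≠ some ' ') :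
    pvSkipSpacesA s i = some (pvSkipSpB s i) := by
  obtain ⟨k, hk1, hk2, hk3⟩ := hw
  have hilen : i < (s.length : Int) := by omega
  have hget : PySem.List.pyGet? s i = some s[i.toNat] := PySem.List.pyGet?_eq_some_getElem s h0 hilen
  have hgetD : PySem.List.pyGetD s i '?' = s[i.toNat] := PySem.List.pyGetD_eq_getElem s '?' h0 hilen
  rw [pvSkipSpacesA, pvSkipSpB, hget]
  show (if s[i.toNat] = ' ' then pvSkipSpacesA s (i + 1) else some i) = _
  by_cases hc : s[i.toNat] = ' '
  · rw [if_pos hc, dif_pos ⟨hilen, by rw [hgetD]; exact hc⟩]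
    have hki : (k : Int) ≠ i := by
      intro he
      have : k = i.toNat := by omega
      rw [this, List.getElem?_eq_getElem (by omega)] at hk3
      exact hk3 (by rw [hc])
    exact pvSkipSp_eq s (i+1) (by omega) ⟨k, by omega, hk2, hk3⟩
  · rw [if_neg hc, dif_neg (by rw [hgetD]; exact fun hx => hc hx.2)]
termination_by ((s.length : Int) - i).toNat
decreasing_by omega

theorem pvEnumerate_append (xs : List Char) (y : Char) (a : Int) :
    PySem.List.enumerate (xs ++ [y]) a = PySem.List.enumerate xs a ++ [(a + xs.length, y)] := by
  induction xs generalizing a with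
  | nil => simp [PySem.List.enumerate_nil, PySem.List.enumerate_cons]
  | cons x xs ih =>
      simp [PySem.List.enumerate_cons, ih]
      ring_nf

-- B's stack after scanning the first j characters.
def pvStackOf (s : List Char) (j : Nat) : List Int :=
  (PySem.List.enumerate (s.take j) 0).foldl pvStackStep []

theorem pvStackOf_succ (s : List Char) (j : Nat) (hj : j < s.length) :
    pvStackOf s (j + 1) = pvStackStep (pvStackOf s j) ((j : Int), s[j]) := by
  unfold pvStackOf
  rw [List.take_add_one, List.getElem?_eq_getElem hj]
  simp only [Option.toList_some]
  rw [pvEnumerate_append, List.foldl_append]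
  simp [List.length_take, Nat.min_eq_left (Nat.le_of_lt hj)]

-- Key lemma: A's backward balance search with balance b+1 from position j returns the (b+1)-th
-- unmatched '(' from the right in s[:j] — the b-th element of B's stack — or -1 if there is none.
theorem pvBalance_eq_stack (s : List Char) (j b : Nat) (hj : j ≤ s.length) :
    pvBalanceA s ((b : Int) + 1) (j : Int) = ((pvStackOf s j)[b]?).getD (-1) := by
  induction j generalizing b with
  | zero =>
      rw [pvBalanceA, if_neg (by omega : ¬((b:Int)+1 = 0)), dif_pos (by norm_num : ((0:Nat):Int) - 1 < 0)]
      simp [pvStackOf, PySem.List.enumerate_nil]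
  | succ j ih =>
      have hjl : j < s.length := by omega
      have hgetD : PySem.List.pyGetD s ((j : Nat) : Int) ' ' = s[j] := by
        rw [PySem.List.pyGetD_natCast]
        exact List.getD_eq_getElem s ' ' hjl
      have e1 : ((j+1 : Nat) : Int) - 1 = ((j : Nat) : Int) := by push_cast; ring
      rw [pvBalanceA, if_neg (by omega : ¬ ((b : Int) + 1 = 0)), dif_neg (by push_cast; omega), pvStackOf_succ s j hjl]
      simp only [e1, hgetD]
      by_cases hpo : s[j] = '('
      · have hbal : (if s[j] = '(' then (if s[j] = ')' then (b:Int)+1+1 else (b:Int)+1) - 1 else if s[j] = ')' then (b:Int)+1+1 else (b:Int)+1) = (b : Int) := by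
          simp [hpo]
        have hstep : pvStackStep (pvStackOf s j) ((j : Int), s[j]) = (j : Int) :: pvStackOf s j := by
          simp [pvStackStep, hpo]
        rw [hbal, hstep]
        cases b with
        | zero =>
            rw [pvBalanceA]
            simp
        | succ b' =>
            rw [show ((b'+1 : Nat) : Int) = ((b' : Nat) : Int) + 1 by push_cast; ring, ih b' (by omega)]
            simp
      · by_cases hpc : s[j] = ')'
        · have hbal : (if s[j] = '(' then (if s[j] = ')' then (b:Int)+1+1 else (b:Int)+1) - 1 else if s[j] = ')' then (b:Int)+1+1 else (b:Int)+1) = ((b+1 : Nat) : Int) + 1 := by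
            simp [hpc]
          have hstep : pvStackStep (pvStackOf s j) ((j : Int), s[j]) = (pvStackOf s j).tail := by
            cases pvStackOf s j <;> simp [pvStackStep, hpc]
          rw [hbal, hstep, ih (b+1) (by omega), List.getElem?_tail]
        · have hbal : (if s[j] = '(' then (if s[j] = ')' then (b:Int)+1+1 else (b:Int)+1) - 1 else if s[j] = ')' then (b:Int)+1+1 else (b:Int)+1) = (b : Int) + 1 := by
            simp [hpo, hpc]
          have hstep : pvStackStep (pvStackOf s j) ((j : Int), s[j]) = pvStackOf s j := by
            simp [pvStackStep, hpo, hpc]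
          rw [hbal, hstep, ih b (by omega)]

-- ===== VERDICT (by name: the statement is the Claim_ definition above) =====
theorem is_variable_in_paranthesis_spec : Claim_equal_is_variable_in_paranthesis := by
  intro line end_var varToBeRemoved _hdom hpre
  obtain ⟨h0, hnc⟩ := hpre
  unfold Spec_is_variable_in_paranthesis is_variable_in_paranthesis is_variable_in_paranthesis_alt
  dsimp only
  rw [← pvSkipWs_eq line.toList end_var h0]
  obtain ⟨hle, hws⟩ := pvSkipWsA_spec line.toList end_var h0
  set s := line.toList with hs
  set i := pvSkipWsA s end_var with hi
  have hi0 : 0 ≤ i := le_trans h0 hle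
  by_cases hlen : (s.length : Int) ≤ i
  · rw [if_pos hlen, if_pos (Or.inl hlen)]
  · push_neg at hlen
    have hlt : i.toNat < s.length := by omega
    have hget : PySem.List.pyGet? s i = some (s[i.toNat]'hlt) := PySem.List.pyGet?_eq_some_getElem s hi0 hlen
    have hgetD : PySem.List.pyGetD s i '?' = s[i.toNat]'hlt := PySem.List.pyGetD_eq_getElem s '?' hi0 hlen
    rw [if_neg (by omega : ¬ (s.length : Int) ≤ i), hget]
    show (if s[i.toNat]'hlt = ')' then _ else _) = _
    by_cases hc : s[i.toNat]'hlt = ')'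
    · rw [if_pos hc, if_neg (by rw [hgetD]; exact fun hor => hor.elim (by omega) (fun hne => hne hc))]
      have hstack : (PySem.List.enumerate (PySem.List.slice s none (some i)) 0).foldl pvStackStep ([] : List Int) = pvStackOf s i.toNat := by
        rw [PySem.List.slice_to s hi0]
        rfl
      have hbal : pvBalanceA s 1 (i + 1 - 1) = (pvStackOf s i.toNat).headD (-1) := by
        rw [show i + 1 - 1 = ((i.toNat : Nat) : Int) by omega]
        have h1 : pvBalanceA s 1 ((i.toNat : Nat) : Int) = (pvStackOf s i.toNat)[0]?.getD (-1) := by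
          have h2 := pvBalance_eq_stack s i.toNat 0 (by omega)
          rwa [show ((0 : Nat) : Int) + 1 = (1 : Int) by norm_num] at h2
        rw [h1]
        cases pvStackOf s i.toNat <;> simp
      have hwit : ∃ k : Nat, (i + 1) ≤ (k : Int) ∧ k < s.length ∧ s[k]? ≠ some ' ' := by
        by_contra hall
        push_neg at hall
        apply hnc
        refine ⟨i.toNat, by omega, by omega, ?_, ?_, ?_⟩
        · rw [List.getElem?_eq_getElem hlt, hc]
        · intro k hk hke
          exact hws k hke (by omega)
        · intro k hk1 hk2
          exact hall k (by omega) hk1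
      rw [pvSkipSp_eq s (i + 1) (by omega) hwit, hstack, hbal]
    · rw [if_neg hc, if_pos (Or.inr (by rw [hgetD]; exact hc))]
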